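-- pv_equiv track=rewrite | github.com/Noble-Mushtak/Linear-Algebra-Library | numerical.py | matrix_column_swap
-- ===== SOURCE A (Python) =====
-- def matrix_column_swap(matrix, column_index1, column_index2):
--     '''
--     Given a matrix and two integers representing the indices of
--      two diferent columns, swap the two given columns.
--
--     Note that this does not modify the given matrix in place,
--      but rather returns a new matrix.
--     '''
--     if column_index1 < 0 or column_index1 >= len(matrix[0]):
--         raise ValueError("Column index does not make sense")
--     if column_index2 < 0 or column_index2 >= len(matrix[0]):
--         raise ValueError("Column index does not make sense")
--
--     return [
--         [
--             matrix[i]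
--             [
--                 column_index2 if (j == column_index1)
--                 else column_index1 if (j == column_index2)
--                 else j
--             ]
--             for j in range(len(matrix[i]))
--         ]
--         for i in range(len(matrix))
--     ]
-- ===== SOURCE B (Python) =====
-- def matrix_column_swap(matrix, column_index1, column_index2):
--     if column_index1 < 0 or column_index1 >= len(matrix[0]):
--         raise ValueError("Column index does not make sense")
--     if column_index2 < 0 or column_index2 >= len(matrix[0]):
--         raise ValueError("Column index does not make sense")
--     lo, hi = sorted((column_index1, column_index2))
--     if lo == hi:
--         return [row[:] for row in matrix]
--     return [row[:lo] + [row[hi]] + row[lo + 1:hi] + [row[lo]] + row[hi + 1:]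
--             for row in matrix]
-- ===== Notes on version B (the rewrite author's own statement) =====
-- stated objective: alternative
-- what changed: B normalizes the two indices to (lo, hi) and builds each output row by slicing and concatenation (row[:lo] + [row[hi]] + row[lo+1:hi] + [row[lo]] + row[hi+1:]), with no inner per-index loop, instead of A's nested comprehension that rebuilds every row element-by-element through a per-index remapping conditional.
-- outside the precondition, e.g. on matrix_column_swap([[1, 2], []], 0, 1): A returns [[2, 1], []], B raises IndexError
import Mathlib
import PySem

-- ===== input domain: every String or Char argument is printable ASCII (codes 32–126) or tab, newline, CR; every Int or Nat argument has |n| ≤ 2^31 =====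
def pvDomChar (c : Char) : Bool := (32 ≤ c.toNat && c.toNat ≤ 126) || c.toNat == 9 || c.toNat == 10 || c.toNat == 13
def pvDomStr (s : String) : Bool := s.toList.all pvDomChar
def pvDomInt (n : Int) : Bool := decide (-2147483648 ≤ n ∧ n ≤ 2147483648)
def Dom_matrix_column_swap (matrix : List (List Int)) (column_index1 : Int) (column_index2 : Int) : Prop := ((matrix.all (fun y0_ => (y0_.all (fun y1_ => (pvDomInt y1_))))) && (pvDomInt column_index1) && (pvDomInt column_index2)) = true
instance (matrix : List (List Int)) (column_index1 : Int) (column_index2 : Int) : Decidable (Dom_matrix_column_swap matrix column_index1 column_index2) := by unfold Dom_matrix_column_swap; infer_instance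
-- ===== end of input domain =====

-- B builds each output row by slicing and splicing around the two swapped positions
-- (no inner index loop at all), instead of rebuilding every row element-by-element
-- with a per-index selection expression (objective: alternative).

-- ===== PORT A =====
-- the ValueError guards and in-range indexing are handled by Pre_ below; pyGetD's
-- default is never reached inside Pre_
def matrix_column_swap (matrix : List (List Int)) (column_index1 : Int) (column_index2 : Int) : List (List Int) :=
  (PySem.List.pyRange 0 matrix.length 1).map (fun i =>
    let row := PySem.List.pyGetD matrix i []
    (PySem.List.pyRange 0 row.length 1).map (fun j =>
      PySem.List.pyGetD row
        (if j == column_index1 then column_index2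
         else if j == column_index2 then column_index1
         else j) 0))

-- ===== PORT B =====
def matrix_column_swap_alt (matrix : List (List Int)) (column_index1 : Int) (column_index2 : Int) : List (List Int) :=
  let lo := min column_index1 column_index2
  let hi := max column_index1 column_index2
  if lo == hi then
    matrix.map (fun row => PySem.List.slice row none none)
  else
    matrix.map (fun row =>
      PySem.List.slice row none (some lo) ++ [PySem.List.pyGetD row hi 0] ++
      PySem.List.slice row (some (lo + 1)) (some hi) ++ [PySem.List.pyGetD row lo 0] ++
      PySem.List.slice row (some (hi + 1)) none)

-- ===== PRECONDITION & SPEC =====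
-- Pre_ excludes: (a) inputs where A raises (empty matrix, a column index outside row 0,
-- a ragged row shorter than exactly one of the two indices — IndexError/ValueError), and
-- (b) ragged matrices with a row shorter than BOTH indices, where A silently copies that
-- row unchanged but B's splice itself raises IndexError.
def Pre_matrix_column_swap (matrix : List (List Int)) (column_index1 : Int) (column_index2 : Int) : Prop :=
  matrix ≠ [] ∧ 0 ≤ column_index1 ∧ 0 ≤ column_index2 ∧
  ∀ row ∈ matrix, column_index1 < (row.length : Int) ∧ column_index2 < (row.length : Int)
instance (matrix : List (List Int)) (column_index1 : Int) (column_index2 : Int) : Decidable (Pre_matrix_column_swap matrix column_index1 column_index2) := by unfold Pre_matrix_column_swap; infer_instance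

def pvWitness_matrix_column_swap : List (List Int) × Int × Int := ([[1, 2, 3], [4, 5, 6]], 0, 2)

def Spec_matrix_column_swap (matrix : List (List Int)) (column_index1 : Int) (column_index2 : Int) (out : List (List Int)) : Prop := out = matrix_column_swap_alt matrix column_index1 column_index2
instance (matrix : List (List Int)) (column_index1 : Int) (column_index2 : Int) (out : List (List Int)) : Decidable (Spec_matrix_column_swap matrix column_index1 column_index2 out) := by unfold Spec_matrix_column_swap; infer_instance

-- ===== CLAIM (what is proved, stated in full; the proofs are below) =====
def Claim_equal_matrix_column_swap : Prop := ∀ (matrix : List (List Int)) (column_index1 : Int) (column_index2 : Int), Dom_matrix_column_swap matrix column_index1 column_index2 → Pre_matrix_column_swap matrix column_index1 column_index2 → Spec_matrix_column_swap matrix column_index1 column_index2 (matrix_column_swap matrix column_index1 column_index2)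

-- ===== LEMMAS AND PROOFS =====

-- when the two indices coincide, A's remap is the identity and the rebuilt row is the row
theorem row_id_eq (row : List Int) (c : Int) :
    (PySem.List.pyRange 0 row.length 1).map (fun j =>
      PySem.List.pyGetD row (if j == c then c else if j == c then c else j) 0) = row := by
  have h : ∀ j : Int, (if j == c then c else if j == c then c else j) = j := by
    intro j; by_cases e : j = c <;> simp [e]
  calc (PySem.List.pyRange 0 row.length 1).map (fun j =>
        PySem.List.pyGetD row (if j == c then c else if j == c then c else j) 0)
      = (PySem.List.pyRange 0 row.length 1).map (fun j => PySem.List.pyGetD row j 0) := by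
        apply List.map_congr_left; intro j _; rw [h]
    _ = row := PySem.List.map_pyGetD_pyRange_zero row 0

-- A's rebuilt row, for in-range lo < hi, is a double List.set of the row
theorem row_map_eq_set (row : List Int) (lo hi : Int)
    (h0 : 0 ≤ lo) (hlh : lo < hi) (hl : hi < (row.length : Int)) :
    (PySem.List.pyRange 0 row.length 1).map (fun j =>
      PySem.List.pyGetD row (if j == lo then hi else if j == hi then lo else j) 0)
    = (row.set lo.toNat (row[hi.toNat]'(by omega))).set hi.toNat (row[lo.toNat]'(by omega)) := by
  have hlo : lo.toNat < row.length := by omega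
  have hhi : hi.toNat < row.length := by omega
  rw [show ((row.length : Int)) = ((row.length : Nat) : Int) from rfl,
      PySem.List.pyRange_zero_natCast, List.map_map]
  apply List.ext_getElem (by simp)
  intro j hj hj'
  have hjlen : j < row.length := by simpa using hj
  simp only [List.getElem_map, List.getElem_range, Function.comp, List.getElem_set]
  by_cases e1 : (j : Int) = lo
  · have hb1 : ((j : Int) == lo) = true := by simpa using e1
    have hjl : lo.toNat = j := by omega
    have hne : ¬ hi.toNat = j := by omega
    simp only [hb1, if_true, hjl, if_neg hne]
    exact PySem.List.pyGetD_eq_getElem _ _ (by omega) hl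
  · by_cases e2 : (j : Int) = hi
    · have hb1 : ((j : Int) == lo) = false := by simpa using e1
      have hb2 : ((j : Int) == hi) = true := by simpa using e2
      have hjh : hi.toNat = j := by omega
      simp only [hb1, hb2, Bool.false_eq_true, if_false, if_true, hjh]
      exact PySem.List.pyGetD_eq_getElem _ _ h0 (by omega)
    · have hb1 : ((j : Int) == lo) = false := by simpa using e1
      have hb2 : ((j : Int) == hi) = false := by simpa using e2
      have hne1 : ¬ hi.toNat = j := by omega
      have hne2 : ¬ lo.toNat = j := by omega
      simp only [hb1, hb2, Bool.false_eq_true, if_false, if_neg hne1, if_neg hne2]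
      rw [PySem.List.pyGetD_eq_getElem _ _ (by omega) (by exact_mod_cast hjlen)]
      simp

-- B's splice of slices, for lo < hi in range, is the same double List.set
theorem splice_eq_set (row : List Int) (lo hi : Nat) (hlh : lo < hi) (hl : hi < row.length) :
    row.take lo ++ [row[hi]] ++ (row.drop (lo + 1)).take (hi - (lo + 1)) ++
      [row[lo]'(by omega)] ++ row.drop (hi + 1)
    = (row.set lo row[hi]).set hi (row[lo]'(by omega)) := by
  rw [List.set_eq_take_cons_drop _ (by simpa using hl), List.take_set,
      List.drop_set, if_pos (by omega),
      List.set_eq_take_cons_drop _ (by simp; omega),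
      List.take_take, min_eq_left (by omega),
      show (row.take hi).drop (lo + 1) = (row.drop (lo + 1)).take (hi - (lo + 1)) by
        rw [List.take_drop, show lo + 1 + (hi - (lo + 1)) = hi by omega]]
  simp [List.append_assoc]

-- A's rebuilt row, for in-range lo < hi, equals B's splice of slices
theorem row_splice_eq (row : List Int) (lo hi : Int)
    (h0 : 0 ≤ lo) (hlh : lo < hi) (hl : hi < (row.length : Int)) :
    (PySem.List.pyRange 0 row.length 1).map (fun j =>
      PySem.List.pyGetD row (if j == lo then hi else if j == hi then lo else j) 0)
    = PySem.List.slice row none (some lo) ++ [PySem.List.pyGetD row hi 0] ++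
      PySem.List.slice row (some (lo + 1)) (some hi) ++ [PySem.List.pyGetD row lo 0] ++
      PySem.List.slice row (some (hi + 1)) none := by
  have hlo : lo.toNat < row.length := by omega
  have hhi : hi.toNat < row.length := by omega
  rw [PySem.List.pyGetD_eq_getElem _ _ h0 (by omega),
      PySem.List.pyGetD_eq_getElem _ _ (by omega) hl,
      PySem.List.slice_to _ h0,
      PySem.List.slice_of_nonneg _ (by omega) (by omega) (by omega) (by omega),
      PySem.List.slice_from _ (by omega),
      show (lo + 1).toNat = lo.toNat + 1 by omega,
      show (hi + 1).toNat = hi.toNat + 1 by omega,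
      row_map_eq_set row lo hi h0 hlh hl,
      ← splice_eq_set row lo.toNat hi.toNat (by omega) hhi]

-- the per-index remapping is symmetric in (c1, c2), so it can be stated on (min, max)
theorem remap_min_max (c1 c2 j : Int) :
    (if j == c1 then c2 else if j == c2 then c1 else j)
    = (if j == min c1 c2 then max c1 c2 else if j == max c1 c2 then min c1 c2 else j) := by
  rcases le_total c1 c2 with h | h
  · rw [min_eq_left h, max_eq_right h]
  · rw [min_eq_right h, max_eq_left h]
    by_cases e1 : j = c1 <;> by_cases e2 : j = c2 <;> simp_all

theorem matrix_column_swap_spec : Claim_equal_matrix_column_swap := by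
  intro matrix c1 c2 _ hpre
  obtain ⟨hne, h1, h2, hrows⟩ := hpre
  unfold Spec_matrix_column_swap matrix_column_swap matrix_column_swap_alt
  rw [show ((matrix.length : Int)) = ((matrix.length : Nat) : Int) from rfl,
      PySem.List.pyRange_zero_natCast, List.map_map]
  by_cases heq : min c1 c2 = max c1 c2
  · -- c1 = c2 : the remap is the identity, B copies each row
    have hcc : c1 = c2 := by
      rcases le_total c1 c2 with h | h
      · simpa [min_eq_left h, max_eq_right h] using heq
      · simpa [min_eq_right h, max_eq_left h] using heq.symm
    simp only [heq, beq_self_eq_true, if_true, PySem.List.slice_none_none]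
    subst hcc
    apply List.ext_getElem (by simp)
    intro i hi _
    have hi' : i < matrix.length := by simpa using hi
    simp only [List.getElem_map, List.getElem_range, Function.comp]
    have hget : PySem.List.pyGetD matrix ((i : Nat) : Int) [] = matrix[i] := by
      rw [PySem.List.pyGetD_natCast]; simp [List.getD, hi']
    rw [hget, row_id_eq]
  · have hlt : min c1 c2 < max c1 c2 := lt_of_le_of_ne min_le_max heq
    have hne' : (min c1 c2 == max c1 c2) = false := by simpa using heq
    simp only [hne', Bool.false_eq_true, if_false]
    apply List.ext_getElem (by simp)
    intro i hi _
    have hi' : i < matrix.length := by simpa using hi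
    simp only [List.getElem_map, List.getElem_range, Function.comp]
    have hget : PySem.List.pyGetD matrix ((i : Nat) : Int) [] = matrix[i] := by
      rw [PySem.List.pyGetD_natCast]; simp [List.getD, hi']
    rw [hget]
    have hmem : matrix[i] ∈ matrix := List.getElem_mem _
    have hb := hrows _ hmem
    have hmaxlt : max c1 c2 < (matrix[i].length : Int) := by
      rcases le_total c1 c2 with h | h
      · simpa [max_eq_right h] using hb.2
      · simpa [max_eq_left h] using hb.1
    have hmin0 : 0 ≤ min c1 c2 := le_min h1 h2
    calc (PySem.List.pyRange 0 matrix[i].length 1).map (fun j =>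
          PySem.List.pyGetD matrix[i] (if j == c1 then c2 else if j == c2 then c1 else j) 0)
        = (PySem.List.pyRange 0 matrix[i].length 1).map (fun j =>
          PySem.List.pyGetD matrix[i]
            (if j == min c1 c2 then max c1 c2 else if j == max c1 c2 then min c1 c2 else j) 0) := by
          apply List.map_congr_left; intro j _; rw [remap_min_max]
      _ = _ := row_splice_eq _ _ _ hmin0 hlt hmaxlt
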